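-- pv_equiv track=rewrite | github.com/Kumbi-Malvin/Hobby | Drone Delivery/Delivery.py | SimpleOrderAssignment
-- ===== SOURCE A (Python) =====
-- def SimpleOrderAssignment(Orders,Drones):
--     for Drone in Drones: # Looks at all the Drones
--         if Drone[-2] == 'A': # If that Drone is available then continue.
--             for Order in Orders: # Look through the orders to see if are any unassigned orders 'U'
--                 if Order[0] == 'U':
--                     Order[0] = Drone[-1] # Once an unassigned order is found, it becomes assigned by the Drones ID so it can be called upon later when loading and delivering.
--                     Drone[-2] = 'L' # Drone becomes unavailable and the enxt step once assignment is loading hence 'L'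
--                     break # Once order is assigned, tehre is no need to look as the other orders as this Drone is occupied
--                 else:
--                     pass # If the order is not 'U' (Unassigned), then go onto the next order
--         else:
--             pass #If Drone is not 'A' (Available), then move onto the next Drone
--     return Orders, Drones
-- ===== SOURCE B (Python) =====
-- def SimpleOrderAssignment(Orders, Drones):
--     j = 0  # index of the first order that may still be unassigned
--     n = len(Orders)
--     for Drone in Drones:
--         if Drone[-2] == 'A':
--             while j < n and Orders[j][0] != 'U':
--                 j += 1
--             if j < n:
--                 Orders[j][0] = Drone[-1]
--                 Drone[-2] = 'L'
--     return Orders, Drones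
-- ===== Notes on version B (the rewrite author's own statement) =====
-- stated objective: alternative
-- what changed: A rescans Orders from the start for every available drone; B keeps one forward pointer to the first possibly-unassigned order and advances it monotonically across drones, so each order position is revisited only when its newly written ID must be re-checked.
import Mathlib
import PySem

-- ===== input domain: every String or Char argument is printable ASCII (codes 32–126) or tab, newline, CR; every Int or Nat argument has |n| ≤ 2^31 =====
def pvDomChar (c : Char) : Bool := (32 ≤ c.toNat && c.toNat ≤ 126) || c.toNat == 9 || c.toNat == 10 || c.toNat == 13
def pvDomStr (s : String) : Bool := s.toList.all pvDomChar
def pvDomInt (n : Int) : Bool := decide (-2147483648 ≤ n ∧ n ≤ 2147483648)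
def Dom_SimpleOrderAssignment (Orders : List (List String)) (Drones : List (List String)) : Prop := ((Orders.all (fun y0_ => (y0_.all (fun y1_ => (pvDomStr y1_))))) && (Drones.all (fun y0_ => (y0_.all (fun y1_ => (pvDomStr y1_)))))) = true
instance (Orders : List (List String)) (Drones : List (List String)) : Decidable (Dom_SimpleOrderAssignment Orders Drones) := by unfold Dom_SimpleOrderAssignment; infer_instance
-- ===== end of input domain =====

-- B replaces A's per-drone rescan of Orders by one monotone forward pointer over Orders
-- (alternative single-pass strategy); both A and B mutate Orders/Drones in place in
-- Python — the equivalence proved here is about the returned (Orders, Drones) pair.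


-- ===== PORT A =====
-- inner `for Order in Orders: if Order[0]=='U': Order[0]=Drone[-1]; Drone[-2]='L'; break`
-- returns `some` updated Orders if an unassigned order was found, `none` otherwise.
def pvScanA (id : String) : List (List String) → Option (List (List String))
  | [] => none
  | o :: rest =>
    if PySem.List.pyGet? o 0 = some "U" then some (o.set 0 id :: rest)
    else match pvScanA id rest with
      | some rest' => some (o :: rest')
      | none => none

-- outer `for Drone in Drones` carrying the (mutated) Orders through; returns the final pair.
def pvLoopA : List (List String) → List (List String) → List (List String) × List (List String)
  | orders, [] => (orders, [])
  | orders, d :: ds =>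
    if PySem.List.pyGet? d (-2) = some "A" then
      match pvScanA ((PySem.List.pyGet? d (-1)).getD "") orders with
      | some orders' =>
        let r := pvLoopA orders' ds
        (r.1, d.set (d.length - 2) "L" :: r.2)
      | none =>
        let r := pvLoopA orders ds
        (r.1, d :: r.2)
    else
      let r := pvLoopA orders ds
      (r.1, d :: r.2)

def SimpleOrderAssignment (Orders : List (List String)) (Drones : List (List String)) : List (List String) × List (List String) :=
  pvLoopA Orders Drones

-- ===== PORT B =====
-- `while j < n and Orders[j][0] != 'U': j += 1` (the pointer advance)
def pvAdvance (orders : List (List String)) (j : Nat) : Nat :=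
  if j < orders.length then
    if PySem.List.pyGet? (orders.getD j []) 0 = some "U" then j
    else pvAdvance orders (j + 1)
  else j
termination_by orders.length - j

-- `for Drone in Drones` of B, carrying Orders and the pointer j.
def pvLoopB : List (List String) → Nat → List (List String) → List (List String) × List (List String)
  | orders, _, [] => (orders, [])
  | orders, j, d :: ds =>
    if PySem.List.pyGet? d (-2) = some "A" then
      let j' := pvAdvance orders j
      if j' < orders.length then
        let orders' := orders.set j' ((orders.getD j' []).set 0 ((PySem.List.pyGet? d (-1)).getD ""))
        let r := pvLoopB orders' j' ds
        (r.1, d.set (d.length - 2) "L" :: r.2)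
      else
        let r := pvLoopB orders j' ds
        (r.1, d :: r.2)
    else
      let r := pvLoopB orders j ds
      (r.1, d :: r.2)

def SimpleOrderAssignment_alt (Orders : List (List String)) (Drones : List (List String)) : List (List String) × List (List String) :=
  pvLoopB Orders 0 Drones

-- ===== PRECONDITION & SPEC =====
-- Pre_ excludes inputs where Python A raises IndexError (a drone row shorter than 2, or an
-- empty order row while some available drone scans Orders); requiring ALL order rows nonempty
-- in that case is slightly wider than the exact crash set (an empty order row past the scans'
-- break points is never touched) — see cites.
def Pre_SimpleOrderAssignment (Orders : List (List String)) (Drones : List (List String)) : Prop :=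
  (∀ d ∈ Drones, 2 ≤ d.length) ∧
  ((∃ d ∈ Drones, PySem.List.pyGet? d (-2) = some "A") → ∀ o ∈ Orders, o ≠ [])
instance (Orders : List (List String)) (Drones : List (List String)) : Decidable (Pre_SimpleOrderAssignment Orders Drones) := by unfold Pre_SimpleOrderAssignment; infer_instance

def pvWitness_SimpleOrderAssignment : List (List String) × List (List String) :=
  ([["U", "p1"], ["A", "p2"], ["U", "p3"]], [["A", "d1"], ["L", "d2"], ["A", "d3"]])

def Spec_SimpleOrderAssignment (Orders : List (List String)) (Drones : List (List String)) (out : List (List String) × List (List String)) : Prop := out = SimpleOrderAssignment_alt Orders Drones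
instance (Orders : List (List String)) (Drones : List (List String)) (out : List (List String) × List (List String)) : Decidable (Spec_SimpleOrderAssignment Orders Drones out) := by unfold Spec_SimpleOrderAssignment; infer_instance

-- ===== CLAIM (what is proved, stated in full; the proofs are below) =====
def Claim_equal_SimpleOrderAssignment : Prop := ∀ (Orders : List (List String)) (Drones : List (List String)), Dom_SimpleOrderAssignment Orders Drones → Pre_SimpleOrderAssignment Orders Drones → Spec_SimpleOrderAssignment Orders Drones (SimpleOrderAssignment Orders Drones)

-- ===== LEMMAS AND PROOFS =====

-- first index whose row starts with "U" (structural reference point for both ports)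
def pvFirstU : List (List String) → Option Nat
  | [] => none
  | o :: rest =>
    if PySem.List.pyGet? o 0 = some "U" then some 0
    else (pvFirstU rest).map (· + 1)

theorem pvScanA_eq_firstU (id : String) (orders : List (List String)) :
    pvScanA id orders =
      (pvFirstU orders).map (fun k => orders.set k ((orders.getD k []).set 0 id)) := by
  induction orders with
  | nil => rfl
  | cons o rest ih =>
    simp only [pvScanA, pvFirstU]
    by_cases h : PySem.List.pyGet? o 0 = some "U"
    · simp [h]
    · simp only [h, if_neg, ih, not_false_iff]
      cases hf : pvFirstU rest <;> simp

theorem pvAdvance_stop (orders : List (List String)) (j : Nat) (h : ¬ j < orders.length) :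
    pvAdvance orders j = j := by
  unfold pvAdvance; simp [h]

theorem pvAdvance_hit (orders : List (List String)) (j : Nat) (h : j < orders.length)
    (hu : PySem.List.pyGet? (orders.getD j []) 0 = some "U") :
    pvAdvance orders j = j := by
  have hg : orders.getD j ([] : List String) = orders[j] := by
    simp [List.getD_eq_getElem?_getD, List.getElem?_eq_getElem h]
  rw [hg] at hu
  unfold pvAdvance; simp [h, hu]

theorem pvAdvance_skip (orders : List (List String)) (j : Nat) (h : j < orders.length)
    (hu : ¬ PySem.List.pyGet? (orders.getD j []) 0 = some "U") :
    pvAdvance orders j = pvAdvance orders (j + 1) := by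
  have hg : orders.getD j ([] : List String) = orders[j] := by
    simp [List.getD_eq_getElem?_getD, List.getElem?_eq_getElem h]
  rw [hg] at hu
  conv_lhs => unfold pvAdvance
  simp [h, hu]

theorem pvFirstU_none (orders : List (List String)) (h : pvFirstU orders = none) :
    ∀ i < orders.length, PySem.List.pyGet? (orders.getD i []) 0 ≠ some "U" := by
  induction orders with
  | nil => intro i hi; simp at hi
  | cons o rest ih =>
    intro i hi
    simp only [pvFirstU] at h
    by_cases hu : PySem.List.pyGet? o 0 = some "U"
    · simp [hu] at h
    · simp only [hu, if_neg, not_false_iff, Option.map_eq_none_iff] at h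
      cases i with
      | zero => simpa using hu
      | succ i => exact ih h i (by simpa using hi)

theorem pvFirstU_some (orders : List (List String)) (k : Nat) (h : pvFirstU orders = some k) :
    k < orders.length ∧ PySem.List.pyGet? (orders.getD k []) 0 = some "U" ∧
      (∀ i < k, PySem.List.pyGet? (orders.getD i []) 0 ≠ some "U") := by
  induction orders generalizing k with
  | nil => simp [pvFirstU] at h
  | cons o rest ih =>
    simp only [pvFirstU] at h
    by_cases hu : PySem.List.pyGet? o 0 = some "U"
    · simp only [hu, if_pos] at h
      obtain rfl : k = 0 := by simpa using h.symm
      exact ⟨by simp, by simpa using hu, by intro i hi; omega⟩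
    · simp only [hu, if_neg, not_false_iff, Option.map_eq_some_iff] at h
      obtain ⟨k', hk', rfl⟩ := h
      obtain ⟨h1, h2, h3⟩ := ih k' hk'
      refine ⟨by simpa using h1, by simpa using h2, ?_⟩
      intro i hi
      cases i with
      | zero => simpa using hu
      | succ i => exact h3 i (by omega)

-- the pointer equals the global first-"U" index once the prefix below it is known non-"U"
theorem pvAdvance_eq_firstU (orders : List (List String)) :
    ∀ j, j ≤ orders.length →
      (∀ i < j, PySem.List.pyGet? (orders.getD i []) 0 ≠ some "U") →
      pvAdvance orders j = (pvFirstU orders).getD orders.length := by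
  intro j hj hpre
  induction hn : orders.length - j generalizing j with
  | zero =>
    have hj' : j = orders.length := by omega
    subst hj'
    rw [pvAdvance_stop _ _ (by omega)]
    cases hf : pvFirstU orders with
    | none => simp
    | some k =>
      obtain ⟨h1, h2, _⟩ := pvFirstU_some orders k hf
      exact absurd h2 (hpre k h1)
  | succ n ih =>
    have hjlt : j < orders.length := by omega
    by_cases hu : PySem.List.pyGet? (orders.getD j []) 0 = some "U"
    · rw [pvAdvance_hit _ _ hjlt hu]
      cases hf : pvFirstU orders with
      | none => exact absurd hu (pvFirstU_none orders hf j hjlt)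
      | some k =>
        obtain ⟨h1, h2, h3⟩ := pvFirstU_some orders k hf
        have hkj : ¬ k < j := fun hlt => hpre k hlt h2
        have hjk : ¬ j < k := fun hlt => h3 j hlt hu
        simp [show k = j by omega]
    · rw [pvAdvance_skip _ _ hjlt hu]
      refine ih (j + 1) (by omega) ?_ (by omega)
      intro i hi
      rcases Nat.lt_succ_iff_lt_or_eq.mp hi with h | h
      · exact hpre i h
      · subst h; exact hu

theorem main_loop_eq (ds : List (List String)) :
    ∀ (orders : List (List String)) (j : Nat), j ≤ orders.length →
      (∀ i < j, PySem.List.pyGet? (orders.getD i []) 0 ≠ some "U") →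
      pvLoopA orders ds = pvLoopB orders j ds := by
  induction ds with
  | nil => intro orders j _ _; rfl
  | cons d ds ih =>
    intro orders j hj hpre
    simp only [pvLoopA, pvLoopB]
    by_cases hd : PySem.List.pyGet? d (-2) = some "A"
    · simp only [hd, if_pos]
      have hadv := pvAdvance_eq_firstU orders j hj hpre
      rw [pvScanA_eq_firstU]
      cases hf : pvFirstU orders with
      | none =>
        have hj' : pvAdvance orders j = orders.length := by rw [hadv, hf]; rfl
        simp only [Option.map_none]
        rw [if_neg (by omega)]
        rw [ih orders (pvAdvance orders j) (by omega)
          (by rw [hj']; exact pvFirstU_none orders hf)]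
      | some k =>
        obtain ⟨h1, h2, h3⟩ := pvFirstU_some orders k hf
        have hj' : pvAdvance orders j = k := by rw [hadv, hf]; rfl
        simp only [Option.map_some]
        rw [if_pos (by omega), hj']
        rw [ih (orders.set k ((orders.getD k []).set 0 ((PySem.List.pyGet? d (-1)).getD ""))) k
          (by simpa using Nat.le_of_lt h1) ?_]
        intro i hi
        have hgd : (orders.set k ((orders.getD k []).set 0 ((PySem.List.pyGet? d (-1)).getD ""))).getD i []
            = orders.getD i [] := by
          simp only [List.getD_eq_getElem?_getD]
          rw [List.getElem?_set_ne (by omega)]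
        rw [hgd]
        exact h3 i hi
    · simp only [hd, if_neg, not_false_iff]
      rw [ih orders j hj hpre]

-- ===== VERDICT (by name: the statement is the Claim_ definition above) =====
theorem SimpleOrderAssignment_spec : Claim_equal_SimpleOrderAssignment := by
  intro Orders Drones _ _
  unfold Spec_SimpleOrderAssignment SimpleOrderAssignment SimpleOrderAssignment_alt
  exact main_loop_eq Drones Orders 0 (Nat.zero_le _) (by intro i hi; omega)
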